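-- pv_equiv track=rewrite | github.com/KaiyangLi1992/RL-ASM_bk | uclasm/matching/naive_baseline.py | check_sets
-- ===== SOURCE A (Python) =====
-- def check_sets(sets_list):
--     # 找到最大集合的大小
--     max_size = max(len(s) for s in sets_list)
--
--     # 计数最大集合的数量
--     max_sets_count = sum(1 for s in sets_list if len(s) == max_size)
--
--     # 如果有超过一个最大集合，直接返回False
--     if max_sets_count > 1:
--         return False
--
--     # 检查除了最大集合外的其他集合的大小是否都为1
--     for s in sets_list:
--         if len(s) != max_size and len(s) != 1:
--             return False
--
--     return True
-- ===== SOURCE B (Python) =====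
-- def check_sets(sets_list):
--     sizes = sorted(len(s) for s in sets_list)
--     return all(x == 1 for x in sizes[:-1]) and (len(sizes) == 1 or sizes[-1] > 1)
-- ===== Notes on version B (the rewrite author's own statement) =====
-- stated objective: simpler
-- what changed: B sorts the sizes once and decides by inspecting the sorted shape (all-but-last equal 1, last strictly greater or a single set), replacing A's three separate scans (max, count of max, validity loop) with sort-then-check.
import Mathlib
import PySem

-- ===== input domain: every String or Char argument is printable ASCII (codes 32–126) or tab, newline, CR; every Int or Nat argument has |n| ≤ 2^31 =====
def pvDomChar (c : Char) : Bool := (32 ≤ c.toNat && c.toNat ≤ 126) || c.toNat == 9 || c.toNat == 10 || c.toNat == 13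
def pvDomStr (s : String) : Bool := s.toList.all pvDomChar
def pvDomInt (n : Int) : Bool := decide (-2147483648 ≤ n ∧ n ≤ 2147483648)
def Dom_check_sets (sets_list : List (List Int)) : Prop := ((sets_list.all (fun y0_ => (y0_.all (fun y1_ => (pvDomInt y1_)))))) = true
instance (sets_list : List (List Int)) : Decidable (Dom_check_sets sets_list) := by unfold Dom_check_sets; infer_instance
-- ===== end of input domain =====

-- B sorts the sizes once and reads the answer off the sorted shape; A makes three scans.
-- Equivalence is proved on all nonempty inputs (both programs raise on []).

-- ===== PORT A =====
-- the final 'for s in sets_list: if len(s) != max_size and len(s) != 1: return False / return True' loop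
def checkLoopA (max_size : Int) : List (List Int) → Bool
  | [] => true
  | s :: rest =>
    if (s.length : Int) ≠ max_size ∧ (s.length : Int) ≠ 1 then false
    else checkLoopA max_size rest

def check_sets (sets_list : List (List Int)) : Bool :=
  -- max_size = max(len(s) for s in sets_list)  (ValueError on [] → none, excluded by Pre_)
  match PySem.List.max? (sets_list.map (fun s => (s.length : Int))) (fun x => x) with
  | none => false
  | some max_size =>
    -- max_sets_count = sum(1 for s in sets_list if len(s) == max_size)
    let max_sets_count : Int :=
      sets_list.foldl (fun acc s => if (s.length : Int) = max_size then acc + 1 else acc) 0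
    if max_sets_count > 1 then false
    else checkLoopA max_size sets_list

-- ===== PORT B =====
def check_sets_alt (sets_list : List (List Int)) : Bool :=
  -- sizes = sorted(len(s) for s in sets_list)
  let sizes : List Int := PySem.List.sorted (sets_list.map (fun s => (s.length : Int))) (fun x => x) false
  -- all(x == 1 for x in sizes[:-1]) and (len(sizes) == 1 or sizes[-1] > 1)
  (PySem.List.slice sizes none (some (-1))).all (fun x => x == 1) &&
    ((sizes.length == 1) ||
      match PySem.List.pyGet? sizes (-1) with   -- sizes[-1]; none = IndexError (only on [], outside Pre_)
      | some v => decide (v > 1)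
      | none => false)

-- ===== PRECONDITION & SPEC =====
-- On [] A raises ValueError (max of empty) and B raises IndexError (sizes[-1]); excluded.
def Pre_check_sets (sets_list : List (List Int)) : Prop := sets_list ≠ []
instance (sets_list : List (List Int)) : Decidable (Pre_check_sets sets_list) := by
  unfold Pre_check_sets; infer_instance

def pvWitness_check_sets : List (List Int) := [[5, 7], [1], [2]]

def Spec_check_sets (sets_list : List (List Int)) (out : Bool) : Prop := out = check_sets_alt sets_list
instance (sets_list : List (List Int)) (out : Bool) : Decidable (Spec_check_sets sets_list out) := by
  unfold Spec_check_sets; infer_instance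

-- ===== CLAIM =====
def Claim_equal_check_sets : Prop := ∀ (sets_list : List (List Int)), Dom_check_sets sets_list → Pre_check_sets sets_list → Spec_check_sets sets_list (check_sets sets_list)

-- ===== LEMMAS AND PROOFS =====

-- A's check loop is the 'all' over the list
theorem checkLoopA_eq_all (m : Int) (l : List (List Int)) :
    checkLoopA m l = l.all (fun s => (s.length : Int) = m || (s.length : Int) = 1) := by
  induction l with
  | nil => rfl
  | cons s rest ih =>
    simp only [checkLoopA, List.all_cons, ih]
    by_cases h1 : (s.length : Int) = m <;> by_cases h2 : (s.length : Int) = 1 <;> simp [h1, h2]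

-- A's counting foldl counts the occurrences of m among the lengths
theorem count_foldl (m : Int) (l : List (List Int)) :
    (l.foldl (fun acc s => if (s.length : Int) = m then acc + 1 else acc) (0 : Int))
      = ((l.map (fun s => (s.length : Int))).count m : Int) := by
  have h : ∀ (c : Int),
      (l.foldl (fun acc s => if (s.length : Int) = m then acc + 1 else acc) c)
        = c + ((l.map (fun s => (s.length : Int))).count m : Int) := by
    induction l with
    | nil => simp
    | cons s rest ih =>
      intro c
      by_cases hs : (s.length : Int) = m
      · simp [List.foldl_cons, hs, ih]
        ring
      · have : ¬ (m = (s.length : Int)) := fun h => hs h.symm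
        simp [List.foldl_cons, hs, ih]
  simpa using h 0

theorem check_sets_eq (sets_list : List (List Int)) (h : sets_list ≠ []) :
    check_sets sets_list = check_sets_alt sets_list := by
  unfold check_sets check_sets_alt
  set L : List Int := sets_list.map (fun s => (s.length : Int)) with hLdef
  have hLne : L ≠ [] := by simp [hLdef, List.map_eq_nil_iff, h]
  set S : List Int := PySem.List.sorted L (fun x => x) false with hSdef
  have hperm : S.Perm L := PySem.List.sorted_perm L (fun x => x) false
  have hSne : S ≠ [] := fun hS =>
    hLne (List.eq_nil_of_length_eq_zero (by simpa [hS] using hperm.length_eq.symm))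
  -- decompose S as S'' ++ [m], m its last (and greatest) element
  clear_value S
  obtain ⟨S'', m, rfl⟩ : ∃ S'' m, S = S'' ++ [m] := by
    rcases List.eq_nil_or_concat S with h' | ⟨S'', m, h'⟩
    · exact absurd h' hSne
    · exact ⟨S'', m, by simpa using h'⟩
  have hpw : (S'' ++ [m]).Pairwise (fun a b => a ≤ b) := by
    have := PySem.List.sorted_pairwise L (fun x => x)
    rwa [← hSdef] at this
  have hle : ∀ x ∈ S'', x ≤ m := by
    intro x hx
    exact (List.pairwise_append.mp hpw).2.2 x hx m (List.mem_singleton_self m)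
  have hmemL : m ∈ L := hperm.mem_iff.mp (List.mem_append_right _ (List.mem_singleton_self m))
  have hmax : ∀ x ∈ L, x ≤ m := by
    intro x hx
    rcases List.mem_append.mp (hperm.mem_iff.mpr hx) with hx' | hx'
    · exact hle x hx'
    · simp_all
  -- A's max? computes exactly m
  have hmaxeq : PySem.List.max? L (fun x => x) = some m := by
    obtain ⟨μ, hμ⟩ : ∃ μ, PySem.List.max? L (fun x => x) = some μ := by
      cases hc : PySem.List.max? L (fun x => x) with
      | none => exact absurd ((PySem.List.max?_eq_none_iff _ _).mp hc) hLne
      | some μ => exact ⟨μ, rfl⟩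
    have hμm : μ ∈ L := PySem.List.max?_mem hμ
    have h1 : μ ≤ m := hmax μ hμm
    have h2 : m ≤ μ := PySem.List.max?_isMax hμ m hmemL
    rw [hμ, le_antisymm h1 h2]
  rw [hmaxeq]
  simp only
  rw [count_foldl m sets_list, ← hLdef, checkLoopA_eq_all]
  -- B's pieces: sizes[:-1] = S'', sizes[-1] = m
  rw [PySem.List.slice_to_neg_one, PySem.List.pyGet?_neg_one]
  have hdl : (S'' ++ [m]).dropLast = S'' := by simp
  have hgl : (S'' ++ [m]).getLast? = some m := by simp
  rw [hdl, hgl]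
  -- counts and 'all' transported along the permutation
  have hcount : L.count m = S''.count m + 1 := by
    rw [← hperm.count_eq]; simp
  have hallP : (sets_list.all (fun s => decide ((s.length : Int) = m) || decide ((s.length : Int) = 1)))
      = (S'' ++ [m]).all (fun x => decide (x = m) || decide (x = 1)) := by
    rw [Bool.eq_iff_iff]
    simp only [List.all_eq_true, Bool.or_eq_true, decide_eq_true_eq]
    constructor
    · intro hp x hx
      have hxL : x ∈ L := hperm.mem_iff.mp hx
      obtain ⟨s, hs, rfl⟩ := List.mem_map.mp (by simpa [hLdef] using hxL)
      exact hp s hs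
    · intro hp s hs
      have : (s.length : Int) ∈ L := by
        rw [hLdef]; exact List.mem_map.mpr ⟨s, hs, rfl⟩
      exact hp _ (hperm.mem_iff.mpr this)
  rw [hallP, hcount]
  -- now a pure statement about S'' and m, with ∀ x ∈ S'', x ≤ m
  split_ifs with hgt
  · -- more than one maximum: m also occurs in S''
    have hmem : m ∈ S'' := by
      have : 0 < S''.count m := by push_cast at hgt; omega
      exact List.count_pos_iff.mp this
    have h0 : S''.length ≠ 0 := fun h0 => (List.ne_nil_of_mem hmem) (List.eq_nil_of_length_eq_zero h0)
    symm
    rw [Bool.and_eq_false_iff]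
    by_cases hm1 : m = 1
    · right
      rw [Bool.or_eq_false_iff]
      constructor
      · simp [h0]
      · simp [hm1]
    · left
      rw [List.all_eq_false]
      exact ⟨m, hmem, by simp [hm1]⟩
  · -- unique maximum
    have hc0 : S''.count m = 0 := by push_cast at hgt; omega
    have hnm : m ∉ S'' := List.count_eq_zero.mp hc0
    rw [Bool.eq_iff_iff]
    simp only [List.all_append, List.all_cons, List.all_nil, Bool.and_true, Bool.and_eq_true,
      Bool.or_eq_true, List.all_eq_true, decide_eq_true_eq, beq_iff_eq, List.length_append,
      List.length_singleton]
    constructor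
    · rintro ⟨hall, -⟩
      have hall1 : ∀ x ∈ S'', x = 1 := by
        intro x hx
        rcases hall x hx with h' | h'
        · exact absurd (h' ▸ hx) hnm
        · exact h'
      refine ⟨hall1, ?_⟩
      rcases List.eq_nil_or_concat S'' with rfl | ⟨t, y, hty⟩
      · left; rfl
      · right
        have hyS : y ∈ S'' := by rw [hty]; simp
        have hy1 : y = 1 := hall1 y hyS
        have hym : y ≤ m := hle y hyS
        have hmne : m ≠ 1 := fun hm1 => hnm (hm1 ▸ hy1 ▸ hyS)
        omega
    · rintro ⟨hall1, hcase⟩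
      refine ⟨fun x hx => Or.inr (hall1 x hx), Or.inl trivial⟩

-- ===== VERDICT =====
theorem check_sets_spec : Claim_equal_check_sets := by
  intro sets_list _ hpre
  unfold Spec_check_sets
  exact check_sets_eq sets_list hpre
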